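-- pv_equiv track=rewrite | github.com/jintaos2/Anime-Crawler | live_update/subscribe.py | epsode_int2str
-- ===== SOURCE A (Python) =====
-- def epsode_int2str(a:set) -> list:    # {1,2,3,5,6,7,8} -> ["01-03", "05-08"]
--
--     def subset(a:list) -> str:
--         '''pop int from a, reuturn str
--         '''
--         start = a.pop()
--         end = start
--         while end + 1 in a:
--             end = a.pop()
--         if start == end:
--             return str(end)
--         else:
--             return str(start) + '-' + str(end)
--     ret = []
--     a = list(a)
--     a.sort(reverse=True)
--     while a:
--         ret.append(subset(a))
--     return ret
-- ===== SOURCE B (Python) =====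
-- def epsode_int2str(a):
--     def fmt(start, end):
--         return str(start) if start == end else str(start) + '-' + str(end)
--     ret = []
--     run = None                       # (start, end) of the current consecutive run
--     for x in sorted(a):
--         if run is None:
--             run = (x, x)
--         elif x == run[1] + 1:
--             run = (run[0], x)
--         else:
--             ret.append(fmt(run[0], run[1]))
--             run = (x, x)
--     if run is not None:
--         ret.append(fmt(run[0], run[1]))
--     return ret
-- ===== Notes on version B (the rewrite author's own statement) =====
-- stated objective: faster
-- what changed: A repeatedly pops from a reverse-sorted list and does an O(n) membership test per element; B sorts ascending once and groups consecutive runs in a single linear pass with a (start,end) accumulator.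
import Mathlib
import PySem

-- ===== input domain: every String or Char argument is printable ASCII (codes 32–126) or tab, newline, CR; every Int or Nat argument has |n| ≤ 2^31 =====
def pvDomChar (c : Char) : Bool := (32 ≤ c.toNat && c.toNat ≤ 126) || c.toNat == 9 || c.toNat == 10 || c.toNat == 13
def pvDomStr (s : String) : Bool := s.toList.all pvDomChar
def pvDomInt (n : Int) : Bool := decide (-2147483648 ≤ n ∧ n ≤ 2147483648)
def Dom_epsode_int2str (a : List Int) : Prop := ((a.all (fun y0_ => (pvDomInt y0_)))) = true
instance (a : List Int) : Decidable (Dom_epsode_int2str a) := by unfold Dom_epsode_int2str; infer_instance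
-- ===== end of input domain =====

-- B replaces A's quadratic pop-and-membership grouping with one ascending sort and a single linear pass (asymptotically faster).


-- ===== PORT A =====
-- inner 'while end + 1 in a: end = a.pop()' of subset; state = (a, end)
def epsode_subsetLoop (a : List Int) (e : Int) : List Int × Int :=
  if (e + 1) ∈ a then
    match h : PySem.List.pop? a with
    | some (v, a') =>
        have : a'.length < a.length := by
          have h1 := PySem.List.length_of_pop?_eq_some a h
          simp only at h1; omega
        epsode_subsetLoop a' v
    | none => (a, e)          -- unreachable: membership makes a nonempty
  else (a, e)
termination_by a.length

-- subset(a): pop start, run the inner while, format; none = IndexError on empty a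
def epsode_subset (a : List Int) : Option (String × List Int) :=
  match PySem.List.pop? a with
  | none => none
  | some (start, a1) =>
      let p := epsode_subsetLoop a1 start
      some (if start == p.2 then PySem.Int.toStr p.2
            else PySem.Int.toStr start ++ "-" ++ PySem.Int.toStr p.2, p.1)

theorem epsode_subsetLoop_len (a : List Int) (e : Int) :
    (epsode_subsetLoop a e).1.length ≤ a.length := by
  induction hn : a.length using Nat.strong_induction_on generalizing a e with
  | _ n ih =>
    rw [epsode_subsetLoop]
    split
    · split
      · next v a' heq =>
        have h1 := PySem.List.length_of_pop?_eq_some a heq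
        simp only at h1
        exact le_trans (ih a'.length (by omega) a' v rfl) (by omega)
      · exact Nat.le_of_eq hn
    · exact Nat.le_of_eq hn

theorem epsode_subset_len (a : List Int) (s : String) (a' : List Int)
    (h : epsode_subset a = some (s, a')) : a'.length < a.length := by
  unfold epsode_subset at h
  cases hp : PySem.List.pop? a with
  | none => rw [hp] at h; exact absurd h (by simp)
  | some r =>
    rw [hp] at h
    have h1 := PySem.List.length_of_pop?_eq_some a hp
    have h2 := epsode_subsetLoop_len r.2 r.1
    obtain ⟨v, a1⟩ := r
    simp only [Option.some.injEq, Prod.mk.injEq] at h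
    simp only at h1 h2
    rw [← h.2] at *
    omega

-- 'while a: ret.append(subset(a))'
def epsode_loop (a : List Int) (ret : List String) : List String :=
  if h : a = [] then ret
  else
    match h2 : epsode_subset a with
    | none => ret             -- unreachable while a ≠ []
    | some (s, a') =>
        have : a'.length < a.length := epsode_subset_len a s a' h2
        epsode_loop a' (ret ++ [s])
termination_by a.length

def epsode_int2str (a : List Int) : List String :=
  epsode_loop (PySem.List.sorted a (fun x => x) true) []

-- ===== PORT B =====
def epsode_fmt (s e : Int) : String :=
  if s == e then PySem.Int.toStr s
  else PySem.Int.toStr s ++ "-" ++ PySem.Int.toStr e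

-- one step of B's for-loop: state = (ret, current run)
def epsode_altStep (st : List String × Option (Int × Int)) (x : Int) :
    List String × Option (Int × Int) :=
  match st.2 with
  | none => (st.1, some (x, x))
  | some (s, e) =>
      if x == e + 1 then (st.1, some (s, x))
      else (st.1 ++ [epsode_fmt s e], some (x, x))

def epsode_int2str_alt (a : List Int) : List String :=
  let st := (PySem.List.sorted a (fun x => x) false).foldl epsode_altStep ([], none)
  match st.2 with
  | none => st.1
  | some (s, e) => st.1 ++ [epsode_fmt s e]

-- ===== PRECONDITION & SPEC =====
-- Pre_ excludes lists with duplicate elements: the Python parameter is declared a set,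
-- and on a duplicated list A's run merging is an accident of pop-and-membership on a list.
def Pre_epsode_int2str (a : List Int) : Prop := a.Nodup
instance (a : List Int) : Decidable (Pre_epsode_int2str a) := by unfold Pre_epsode_int2str; infer_instance
def pvWitness_epsode_int2str : List Int := ([1, 2, 3, 5, 6, 7, 8])

def Spec_epsode_int2str (a : List Int) (out : List String) : Prop := out = epsode_int2str_alt a
instance (a : List Int) (out : List String) : Decidable (Spec_epsode_int2str a out) := by unfold Spec_epsode_int2str; infer_instance

-- ===== CLAIM (what is proved, stated in full; the proofs are below) =====
def Claim_equal_epsode_int2str : Prop := ∀ (a : List Int), Dom_epsode_int2str a → Pre_epsode_int2str a → Spec_epsode_int2str a (epsode_int2str a)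

-- ===== LEMMAS AND PROOFS =====

-- forward version of the inner while: consume the consecutive prefix
def epsode_runF (e : Int) : List Int → Int × List Int
  | [] => (e, [])
  | y :: t => if y = e + 1 then epsode_runF y t else (e, y :: t)

theorem epsode_runF_suffix (e : Int) (t : List Int) : (epsode_runF e t).2.IsSuffix t := by
  induction t generalizing e with
  | nil => simp [epsode_runF]
  | cons y t ih =>
    simp only [epsode_runF]
    split
    · exact (ih y).trans (List.suffix_cons y t)
    · exact List.suffix_rfl

-- forward version of the whole algorithm on the ascending sorted list
def epsode_groupF : List Int → List String
  | [] => []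
  | x :: t =>
      epsode_fmt x (epsode_runF x t).1 :: epsode_groupF (epsode_runF x t).2
termination_by l => l.length
decreasing_by
  have := (epsode_runF_suffix x t).length_le
  simp only [List.length_cons]; omega

theorem epsode_groupF_nil : epsode_groupF [] = [] := by rw [epsode_groupF]

theorem epsode_groupF_cons (x : Int) (t : List Int) :
    epsode_groupF (x :: t) =
      epsode_fmt x (epsode_runF x t).1 :: epsode_groupF (epsode_runF x t).2 := by
  rw [epsode_groupF]

theorem epsode_subsetLoop_eq (t : List Int) (e : Int)
    (hp : (e :: t).Pairwise (· < ·)) :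
    epsode_subsetLoop t.reverse e = ((epsode_runF e t).2.reverse, (epsode_runF e t).1) := by
  induction t generalizing e with
  | nil =>
    simp only [List.reverse_nil, epsode_runF]
    rw [epsode_subsetLoop]
    simp
  | cons y t ih =>
    rw [epsode_subsetLoop]
    rcases List.pairwise_cons.1 hp with ⟨he, ht⟩
    rcases List.pairwise_cons.1 ht with ⟨hy, _⟩
    by_cases hc : y = e + 1
    · subst hc
      have hmem : (e + 1) ∈ ((e + 1) :: t).reverse := by simp
      rw [if_pos hmem]
      have hpop : PySem.List.pop? (((e + 1) :: t).reverse) = some (e + 1, t.reverse) := by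
        have h0 : ((e + 1) :: t).reverse = t.reverse ++ [e + 1] := by simp
        rw [h0, PySem.List.pop?_last]
      split
      · next v a' heq =>
        rw [hpop] at heq
        simp only [Option.some.injEq, Prod.mk.injEq] at heq
        obtain ⟨hv, ha⟩ := heq
        subst hv; subst ha
        simp only [epsode_runF]
        exact ih (e + 1) ht
      · next heq => rw [hpop] at heq; exact absurd heq (by simp)
    · have hmem : (e + 1) ∉ (y :: t).reverse := by
        have hye : e < y := he y (by simp)
        simp only [List.mem_reverse, List.mem_cons]
        rintro (h | h)
        · exact hc h.symm
        · have := hy _ h; omega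
      rw [if_neg hmem]
      simp [epsode_runF, hc]

theorem epsode_loop_eq (zs : List Int) (ret : List String)
    (hp : zs.Pairwise (· < ·)) :
    epsode_loop zs.reverse ret = ret ++ epsode_groupF zs := by
  induction hn : zs.length using Nat.strong_induction_on generalizing zs ret with
  | _ n ih =>
    cases zs with
    | nil =>
      rw [List.reverse_nil, epsode_loop]
      simp [epsode_groupF_nil]
    | cons x t =>
      rw [epsode_loop]
      have hne : (x :: t).reverse ≠ [] := by simp
      rw [dif_neg hne]
      have hpop : PySem.List.pop? ((x :: t).reverse) = some (x, t.reverse) := by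
        have : (x :: t).reverse = t.reverse ++ [x] := by simp
        rw [this, PySem.List.pop?_last]
      have hsub : epsode_subset ((x :: t).reverse) =
          some (epsode_fmt x (epsode_runF x t).1, (epsode_runF x t).2.reverse) := by
        simp only [epsode_subset, hpop, epsode_subsetLoop_eq t x hp, epsode_fmt]
        by_cases hxe : x = (epsode_runF x t).1
        · rw [← hxe]
        · simp [hxe]
      have hsuf := epsode_runF_suffix x t
      have hlen : (epsode_runF x t).2.length < n := by
        have := hsuf.length_le; simp at hn; omega
      have hp2 : (epsode_runF x t).2.Pairwise (· < ·) :=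
        (List.pairwise_cons.1 hp).2.sublist hsuf.sublist
      split
      · next heq => rw [hsub] at heq; exact absurd heq (by simp)
      · next s a' heq =>
        rw [hsub] at heq
        simp only [Option.some.injEq, Prod.mk.injEq] at heq
        obtain ⟨hs, ha⟩ := heq
        subst hs; subst ha
        rw [ih _ hlen _ _ hp2 rfl]
        rw [epsode_groupF_cons]
        simp

theorem epsode_alt_fold (zs : List Int) (ret : List String) (s e : Int) :
    (match (zs.foldl epsode_altStep (ret, some (s, e))).2 with
      | none => (zs.foldl epsode_altStep (ret, some (s, e))).1
      | some (s', e') => (zs.foldl epsode_altStep (ret, some (s, e))).1 ++ [epsode_fmt s' e']) =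
    ret ++ epsode_fmt s (epsode_runF e zs).1 :: epsode_groupF (epsode_runF e zs).2 := by
  induction zs generalizing ret s e with
  | nil => simp [epsode_runF, epsode_groupF_nil]
  | cons x t ih =>
    simp only [List.foldl_cons, epsode_altStep]
    by_cases hc : x = e + 1
    · have : (x == e + 1) = true := by simp [hc]
      simp only [this, if_true]
      rw [ih]
      simp [epsode_runF, hc]
    · have : (x == e + 1) = false := by simp [hc]
      simp only [this, Bool.false_eq_true, if_false]
      rw [ih]
      have hrun : epsode_runF e (x :: t) = (e, x :: t) := by simp [epsode_runF, hc]
      rw [hrun]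
      rw [epsode_groupF_cons]
      simp

theorem epsode_alt_eq_groupF (zs : List Int) : epsode_int2str_alt zs = epsode_groupF (PySem.List.sorted zs (fun x => x) false) := by
  unfold epsode_int2str_alt
  generalize PySem.List.sorted zs (fun x => x) false = ws
  cases ws with
  | nil => simp [epsode_groupF_nil]
  | cons x t =>
    simp only [List.foldl_cons, epsode_altStep]
    have := epsode_alt_fold t [] x x
    simp only [List.nil_append] at this
    rw [this, epsode_groupF_cons]

-- ===== VERDICT (by name: the statement is the Claim_ definition above) =====
theorem epsode_int2str_spec : Claim_equal_epsode_int2str := by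
  intro a _ hpre
  unfold Spec_epsode_int2str epsode_int2str
  have hperm : (PySem.List.sorted a (fun x => x) false).Perm a :=
    PySem.List.sorted_perm a (fun x => x) false
  have hnd : (PySem.List.sorted a (fun x => x) false).Nodup := hperm.nodup_iff.2 hpre
  have hple : (PySem.List.sorted a (fun x => x) false).Pairwise (fun x y => x ≤ y) :=
    PySem.List.sorted_pairwise a (fun x => x)
  have hplt : (PySem.List.sorted a (fun x => x) false).Pairwise (· < ·) := by
    have := List.Pairwise.and hple (List.nodup_iff_pairwise_ne.mp hnd)
    exact this.imp (fun h => lt_of_le_of_ne h.1 h.2)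
  have hrev : PySem.List.sorted a (fun x => x) true =
      (PySem.List.sorted a (fun x => x) false).reverse := by
    apply PySem.List.sorted_rev_eq_of_perm_of_pairwise_gt
    · exact ((PySem.List.sorted a (fun x => x) false).reverse_perm).trans hperm
    · simpa [List.pairwise_reverse] using hplt
  rw [hrev, epsode_loop_eq _ [] hplt, epsode_alt_eq_groupF]
  simp
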